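-- pv_equiv track=rewrite | github.com/eliottcassidy2000/math | 04-computation/dihedral_hp_analysis.py | enumerate_hps
-- ===== SOURCE A (Python) =====
-- def enumerate_hps(A, p):
--     """Enumerate ALL Hamiltonian paths using backtracking."""
--     paths = []
--     def backtrack(path, visited):
--         if len(path) == p:
--             paths.append(tuple(path))
--             return
--         last = path[-1]
--         for u in range(p):
--             if not visited[u] and A[last][u]:
--                 visited[u] = True
--                 path.append(u)
--                 backtrack(path, visited)
--                 path.pop()
--                 visited[u] = False
--
--     for start in range(p):
--         visited = [False]*p
--         visited[start] = True
--         backtrack([start], visited)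
--     return paths
-- ===== SOURCE B (Python) =====
-- def enumerate_hps(A, p):
--     """Enumerate ALL Hamiltonian paths by generate-and-test over all
--     vertex permutations in lexicographic order (no pruning, no visited array)."""
--     if p <= 0:
--         return []
--
--     def perms(rem):
--         if not rem:
--             return [()]
--         return [(u,) + rest for u in rem for rest in perms([v for v in rem if v != u])]
--
--     return [perm for perm in perms(list(range(p)))
--             if all(A[u][v] for u, v in zip(perm, perm[1:]))]
-- ===== Notes on version B (the rewrite author's own statement) =====
-- stated objective: alternative
-- what changed: B replaces A's pruned DFS backtracking (mutable visited array, path push/pop) by generate-and-test: it enumerates all vertex permutations in lexicographic order and keeps those whose consecutive pairs are adjacent, yielding the identical list in the identical order.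
-- outside the precondition, e.g. on enumerate_hps([[0, 1], [1]], 2): A returns [(0, 1), (1, 0)], B returns [(0, 1), (1, 0)]
import Mathlib
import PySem

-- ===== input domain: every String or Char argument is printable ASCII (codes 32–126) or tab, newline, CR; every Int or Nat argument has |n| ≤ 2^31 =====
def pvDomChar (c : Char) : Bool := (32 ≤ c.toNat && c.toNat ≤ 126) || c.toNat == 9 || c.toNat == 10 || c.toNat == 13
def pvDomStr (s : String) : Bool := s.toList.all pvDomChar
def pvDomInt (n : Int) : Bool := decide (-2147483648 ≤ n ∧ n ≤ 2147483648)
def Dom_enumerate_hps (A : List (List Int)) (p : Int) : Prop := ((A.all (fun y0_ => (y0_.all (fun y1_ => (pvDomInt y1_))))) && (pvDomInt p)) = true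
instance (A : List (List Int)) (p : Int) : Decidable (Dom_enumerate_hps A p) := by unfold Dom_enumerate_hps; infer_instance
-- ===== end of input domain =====

-- B replaces A's pruned backtracking (visited array, DFS) by generate-and-test over all
-- vertex permutations in lexicographic order; same result list in the same order (objective: alternative).

-- ===== PORT A =====
-- backtrack(path, visited): fuel is a port artifact (always ≥ the number of unvisited
-- vertices on the calls the port makes, so the zero branch is never taken); list indexing
-- A[last][u] is ported with getD, exact inside Pre_ (indices in range there).
def pvBackA (Adj : List (List Int)) (P : Nat) : Nat → List Nat → List Bool → List (List Nat)
  | fuel, path, visited =>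
    if path.length = P then [path]
    else
      match fuel with
      | 0 => []
      | fuel + 1 =>
        (List.range P).foldl (fun acc u =>
          if !(visited.getD u false) && ((Adj.getD (path.getLastD 0) []).getD u 0 != 0) then
            acc ++ pvBackA Adj P fuel (path ++ [u]) (visited.set u true)
          else acc) []

def enumerate_hps (A : List (List Int)) (p : Int) : List (List Int) :=
  let P := p.toNat
  (((List.range P).foldl (fun acc start =>
      acc ++ pvBackA A P P [start] ((List.replicate P false).set start true)) []).map
    (fun q => q.map (fun n => (n : Int))))

-- ===== PORT B =====
-- termination fact for perms' recursion (cited by name in decreasing_by)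
theorem pvFilterNe_lt (u : Nat) : ∀ (l : List Nat), u ∈ l → (l.filter (fun v => decide (v ≠ u))).length < l.length := by
  intro l h
  induction l with
  | nil => simp at h
  | cons a t ih =>
    rw [List.filter_cons]
    by_cases ha : a = u
    · subst ha
      simp only [ne_eq, not_true_eq_false, decide_false, Bool.false_eq_true, if_false, List.length_cons]
      exact Nat.lt_succ_of_le (List.length_filter_le _ _)
    · have hu : u ∈ t := by cases h with | head => exact absurd rfl ha | tail _ h' => exact h'
      have := ih hu
      split <;> simp only [List.length_cons] <;> omega

-- perms(rem): all permutations of rem, lexicographic for a sorted duplicate-free rem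
def pvLexPerms : List Nat → List (List Nat)
  | [] => [[]]
  | x :: t =>
    (x :: t).attach.flatMap (fun u =>
      (pvLexPerms ((x :: t).filter (fun v => v ≠ u.1))).map (fun r => u.1 :: r))
termination_by xs => xs.length
decreasing_by exact pvFilterNe_lt u.1 (x :: t) u.2

def enumerate_hps_alt (A : List (List Int)) (p : Int) : List (List Int) :=
  if p ≤ 0 then []
  else
    ((pvLexPerms (List.range p.toNat)).filter (fun perm =>
        (perm.zip perm.tail).all (fun uv => (A.getD uv.1 []).getD uv.2 0 != 0))).map
      (fun q => q.map (fun n => (n : Int)))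

-- ===== PRECONDITION & SPEC =====
-- Pre_ excludes inputs on which A's indexing A[last][u] can go out of range (IndexError):
-- for p ≥ 2 it requires a p×p-sufficient matrix (p ≤ len(A), first p rows of length ≥ p);
-- this is slightly narrower than A's exact raise set (on some ragged matrices the missing
-- entry is never reached and A still returns; B returns the same list there); p ≤ 1 never indexes A.
def Pre_enumerate_hps (A : List (List Int)) (p : Int) : Prop :=
  p ≤ 1 ∨ (p.toNat ≤ A.length ∧ ∀ r ∈ A.take p.toNat, p ≤ (r.length : Int))
instance (A : List (List Int)) (p : Int) : Decidable (Pre_enumerate_hps A p) := by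
  unfold Pre_enumerate_hps; infer_instance
def pvWitness_enumerate_hps : List (List Int) × Int := ([[0, 1], [1, 0]], 2)

def Spec_enumerate_hps (A : List (List Int)) (p : Int) (out : List (List Int)) : Prop := out = enumerate_hps_alt A p
instance (A : List (List Int)) (p : Int) (out : List (List Int)) : Decidable (Spec_enumerate_hps A p out) := by unfold Spec_enumerate_hps; infer_instance

-- ===== CLAIM (what is proved, stated in full; the proofs are below) =====
def Claim_equal_enumerate_hps : Prop := ∀ (A : List (List Int)) (p : Int), Dom_enumerate_hps A p → Pre_enumerate_hps A p → Spec_enumerate_hps A p (enumerate_hps A p)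

-- ===== LEMMAS AND PROOFS =====

-- adjacency test used by the proofs (both ports inline this expression)
def pvAdj (Adj : List (List Int)) (l u : Nat) : Bool := (Adj.getD l []).getD u 0 != 0

-- the condition of B's filter, recursively, with an explicit previous vertex
def pvChainFrom (Adj : List (List Int)) : Nat → List Nat → Bool
  | _, [] => true
  | l, u :: t => pvAdj Adj l u && pvChainFrom Adj u t

theorem pvChainB_eq (Adj : List (List Int)) (l : Nat) (q : List Nat) :
    (((l :: q).zip q).all (fun uv => (Adj.getD uv.1 []).getD uv.2 0 != 0)) = pvChainFrom Adj l q := by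
  induction q generalizing l with
  | nil => rfl
  | cons u t ih => simp [pvChainFrom, pvAdj, ← ih u]

theorem pvAttach_flatMap {α β : Type} (l : List α) (g : α → List β) :
    l.attach.flatMap (fun u => g u.1) = l.flatMap g := by
  conv_rhs => rw [← List.attach_map_subtype_val l]
  rw [List.flatMap_map]

theorem pvLexPerms_cons (x : Nat) (t : List Nat) :
    pvLexPerms (x :: t)
      = (x :: t).flatMap (fun u => (pvLexPerms ((x :: t).filter (fun v => v ≠ u))).map (fun r => u :: r)) := by
  rw [pvLexPerms]
  exact pvAttach_flatMap (x :: t)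
    (fun u => (pvLexPerms ((x :: t).filter (fun v => v ≠ u))).map (fun r => u :: r))

theorem pvFilter_flatMap {α β : Type} (c : α → Bool) (g : α → List β) (l : List α) :
    (l.filter c).flatMap g = l.flatMap (fun u => if c u then g u else []) := by
  induction l with
  | nil => rfl
  | cons a t ih => by_cases h : c a <;> simp [h, ih]

theorem pvFlatMap_congr {α β : Type} (l : List α) (f g : α → List β)
    (h : ∀ x ∈ l, f x = g x) : l.flatMap f = l.flatMap g := by
  induction l with
  | nil => rfl
  | cons a t ih =>
    simp only [List.flatMap_cons, h a (by simp), ih (fun x hx => h x (by simp [hx]))]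

theorem pvFilter_and {α : Type} (c : Bool) (p : α → Bool) (l : List α) :
    l.filter (fun x => c && p x) = if c then l.filter p else [] := by
  cases c <;> simp

-- a sorted list of naturals below P is what filtering range P through membership in it yields
theorem pvRange_filter_mem (P : Nat) (R : List Nat) (hs : R.Pairwise (· < ·))
    (hb : ∀ u ∈ R, u < P) :
    (List.range P).filter (fun u => decide (u ∈ R)) = R := by
  have hnr : R.Nodup := hs.imp Nat.ne_of_lt
  have hnf : ((List.range P).filter (fun u => decide (u ∈ R))).Nodup :=
    (List.nodup_range).filter _
  have hperm : ((List.range P).filter (fun u => decide (u ∈ R))).Perm R := by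
    rw [List.perm_iff_count]
    intro a
    rw [hnf.count, hnr.count]
    by_cases h : a ∈ R <;> simp [h, hb a]
  exact List.Perm.eq_of_pairwise (le := (· < ·))
    (fun a b _ _ h1 h2 => absurd h2 (Nat.lt_asymm h1))
    ((List.pairwise_lt_range).filter _) hs hperm

theorem pvGetD_set_true (visited : List Bool) (u v : Nat) (hu : u < visited.length) :
    (visited.set u true).getD v false = if v = u then true else visited.getD v false := by
  by_cases h : v = u
  · subst h; simp [List.getD, hu]
  · simp [List.getD, List.getElem?_set_ne (by omega : u ≠ v), h]

theorem pvFilter_ne_length (R : List Nat) (u : Nat) (hn : R.Nodup) (hu : u ∈ R) :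
    (R.filter (fun v => v ≠ u)).length = R.length - 1 := by
  have h1 : R.filter (fun v => v ≠ u) = R.filter (fun v => v != u) :=
    List.filter_congr (fun v _ => by by_cases h : v = u <;> simp [h])
  rw [h1, ← List.Nodup.erase_eq_filter hn, List.length_erase_of_mem hu]

-- main invariant: the backtracking call equals the filtered lexicographic permutations
-- of the remaining vertex set R, each prefixed with the current path
theorem pvMain (Adj : List (List Int)) (P : Nat) (fuel : Nat) :
    ∀ (R path : List Nat) (visited : List Bool) (l : Nat),
    R.Pairwise (· < ·) →
    (∀ u ∈ R, u < P) →
    visited.length = P →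
    (∀ u, u < P → visited.getD u false = !(decide (u ∈ R))) →
    path.length + R.length = P →
    path.getLastD 0 = l →
    R.length ≤ fuel →
    pvBackA Adj P fuel path visited
      = ((pvLexPerms R).filter (fun q => pvChainFrom Adj l q)).map (fun q => path ++ q) := by
  induction fuel with
  | zero =>
    intro R path visited l hs hb hlen hv hcount hlast hfuel
    have hR : R = [] := List.length_eq_zero_iff.mp (Nat.le_zero.mp hfuel)
    subst hR
    have hplen : path.length = P := by simpa using hcount
    rw [pvBackA]
    simp [hplen, pvLexPerms, pvChainFrom]
  | succ f ih =>
    intro R path visited l hs hb hlen hv hcount hlast hfuel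
    rw [pvBackA]
    by_cases hfull : path.length = P
    · have hR : R = [] := by
        have : R.length = 0 := by omega
        exact List.length_eq_zero_iff.mp this
      subst hR
      simp [hfull, pvLexPerms, pvChainFrom]
    · simp only [hfull, if_false]
      have hnr : R.Nodup := hs.imp Nat.ne_of_lt
      obtain ⟨r, t, hR⟩ : ∃ r t, R = r :: t := by
        cases hRv : R with
        | nil => subst hRv; exact absurd (by simpa using hcount) hfull
        | cons r t => exact ⟨r, t, rfl⟩
      -- left side: fold to flatMap over R
      rw [PySem.List.foldl_if_eq_foldl_filter, PySem.List.foldl_append_eq_flatMap,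
          List.nil_append]
      rw [List.filter_congr (q := fun u => pvAdj Adj l u && decide (u ∈ R))
            (by intro u hu
                have hup : u < P := List.mem_range.mp hu
                have h := hv u hup
                simp only [List.getD] at h
                simp only [pvAdj, List.getD]
                rw [h, Bool.not_not, hlast, Bool.and_comm])]
      rw [← List.filter_filter, pvRange_filter_mem P R hs hb, pvFilter_flatMap]
      -- right side: unfold pvLexPerms and push filter and map inside
      rw [hR, pvLexPerms_cons, ← hR, List.filter_flatMap, List.map_flatMap]
      refine pvFlatMap_congr R _ _ ?_
      intro u hu
      rw [List.filter_map]
      rw [List.filter_congr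
            (p := (fun q => pvChainFrom Adj l q) ∘ fun r => u :: r)
            (q := fun q => pvAdj Adj l u && pvChainFrom Adj u q)
            (fun q _ => rfl),
          pvFilter_and]
      by_cases hadj : pvAdj Adj l u
      · simp only [hadj, if_true]
        have hup : u < P := hb u hu
        have hulen : u < visited.length := by omega
        rw [ih (R.filter (fun v => v ≠ u)) (path ++ [u]) (visited.set u true) u
              (hs.filter _)
              (fun v hv' => hb v (List.mem_filter.mp hv').1)
              (by simp [hlen])
              (by intro v hvP
                  rw [pvGetD_set_true visited u v hulen]
                  by_cases hvu : v = u
                  · subst hvu; simp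
                  · have h2 := hv v hvP
                    simp only [List.getD] at h2
                    simp [h2, List.mem_filter, hvu])
              (by rw [List.length_append, pvFilter_ne_length R u hnr hu]
                  have h1 : 1 ≤ R.length := by rw [hR]; simp
                  simp only [List.length_cons, List.length_nil]
                  omega)
              (by simp)
              (by rw [pvFilter_ne_length R u hnr hu]; omega)]
        rw [List.map_map]
        refine List.map_congr_left (fun q _ => ?_)
        simp [List.append_assoc]
      · simp [hadj]

-- getD on a fresh visited array: true exactly at start
theorem pvVisitedInit (P s u : Nat) (hs : s < P) (_hu : u < P) :
    (((List.replicate P false).set s true).getD u false) = decide (u = s) := by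
  rw [pvGetD_set_true _ s u (by simp [hs])]
  by_cases h : u = s
  · simp [h]
  · simp [h]

-- ===== VERDICT (by name: the statement is the Claim_ definition above) =====
theorem enumerate_hps_spec : Claim_equal_enumerate_hps := by
  intro A p _ _
  unfold Spec_enumerate_hps enumerate_hps enumerate_hps_alt
  by_cases hp : p ≤ 0
  · simp [hp, Int.toNat_eq_zero.mpr hp]
  · simp only [hp, if_false]
    have hP : 0 < p.toNat := by omega
    rw [PySem.List.foldl_append_eq_flatMap, List.nil_append]
    obtain ⟨x, t, hRange⟩ : ∃ x t, List.range p.toNat = x :: t := by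
      cases h : List.range p.toNat with
      | nil => rw [List.range_eq_nil] at h; omega
      | cons x t => exact ⟨x, t, rfl⟩
    conv_rhs => rw [hRange, pvLexPerms_cons, ← hRange]
    rw [List.filter_flatMap, List.map_flatMap, List.map_flatMap]
    refine pvFlatMap_congr _ _ _ ?_
    intro s hsmem
    have hsP : s < p.toNat := List.mem_range.mp hsmem
    rw [pvMain A p.toNat p.toNat ((List.range p.toNat).filter (fun v => v ≠ s)) [s]
          ((List.replicate p.toNat false).set s true) s
          ((List.pairwise_lt_range).filter _)
          (fun v hv' => List.mem_range.mp (List.mem_filter.mp hv').1)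
          (by simp)
          (by intro u huP
              rw [pvVisitedInit p.toNat s u hsP huP]
              by_cases h : u = s <;> simp [List.mem_filter, List.mem_range, huP, h])
          (by rw [pvFilter_ne_length _ s List.nodup_range (List.mem_range.mpr hsP)]
              simp only [List.length_cons, List.length_nil, List.length_range]
              omega)
          (by simp)
          (by rw [pvFilter_ne_length _ s List.nodup_range (List.mem_range.mpr hsP)]
              simp only [List.length_range]
              omega)]
    rw [List.filter_map, List.map_map, List.map_map]
    rw [List.filter_congr
          (p := (fun perm => (perm.zip perm.tail).all
              (fun uv => (A.getD uv.1 []).getD uv.2 0 != 0)) ∘ fun r => s :: r)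
          (q := fun q => pvChainFrom A s q)
          (by intro q _
              show (((s :: q).zip (s :: q).tail).all _) = _
              simp only [List.tail_cons]
              exact pvChainB_eq A s q)]
    refine List.map_congr_left (fun q _ => ?_)
    simp
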